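-- pv_equiv track=rewrite | github.com/devieswar/ArthaNethra | backend/services/markdown_analyzer.py | _generate_array_name
-- ===== SOURCE A (Python) =====
-- from typing import Dict, Any, List, Tuple, Optional
--
-- def _generate_array_name(headers: List[str]) -> str:
--     """Generate a meaningful array name from headers"""
--     # Common patterns
--     if any('city' in h.lower() for h in headers):
--         return "cities"
--     elif any('company' in h.lower() or 'organization' in h.lower() for h in headers):
--         return "companies"
--     elif any('person' in h.lower() or 'employee' in h.lower() for h in headers):
--         return "people"
--     elif any('product' in h.lower() or 'item' in h.lower() for h in headers):
--         return "items"
--     elif any('transaction' in h.lower() or 'payment' in h.lower() for h in headers):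
--         return "transactions"
--     else:
--         return "records"
-- ===== SOURCE B (Python) =====
-- NAMES = ["cities", "companies", "people", "items", "transactions"]
--
-- KEYWORD_RANK = {
--     "city": 0,
--     "company": 1, "organization": 1,
--     "person": 2, "employee": 2,
--     "product": 3, "item": 3,
--     "transaction": 4, "payment": 4,
-- }
--
-- def _generate_array_name(headers):
--     # Single pass over the headers, keeping the best (lowest) matched priority rank.
--     best = 5
--     for h in headers:
--         hl = h.lower()
--         for kw, rank in KEYWORD_RANK.items():
--             if rank < best and kw in hl:
--                 best = rank
--     return NAMES[best] if best < 5 else "records"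
-- ===== Notes on version B (the rewrite author's own statement) =====
-- stated objective: alternative
-- what changed: Instead of A's per-pattern if-elif chain that rescans all headers for each category, B makes a single pass over the headers, maintaining the minimum matched priority rank via a keyword-to-rank map, and indexes a name table at the end.
import Mathlib
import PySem

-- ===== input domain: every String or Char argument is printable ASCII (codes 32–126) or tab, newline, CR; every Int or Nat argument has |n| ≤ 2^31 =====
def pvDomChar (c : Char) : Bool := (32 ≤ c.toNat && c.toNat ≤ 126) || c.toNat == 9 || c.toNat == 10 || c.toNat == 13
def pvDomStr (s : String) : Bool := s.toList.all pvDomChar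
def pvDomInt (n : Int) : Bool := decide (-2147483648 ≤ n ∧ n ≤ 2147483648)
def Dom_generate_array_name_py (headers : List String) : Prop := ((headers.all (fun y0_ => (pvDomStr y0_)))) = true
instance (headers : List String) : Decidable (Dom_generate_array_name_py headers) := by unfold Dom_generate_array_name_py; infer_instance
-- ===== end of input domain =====

-- B: a single pass over the headers keeping the minimum matched priority rank (via a
-- keyword→rank map), instead of A's per-category if-elif chain that rescans all headers.
-- ===== PORT A =====
def generate_array_name_py (headers : List String) : String :=
  if headers.any (fun h => PySem.Str.isIn "city" (PySem.Str.lower h)) then "cities"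
  else if headers.any (fun h => PySem.Str.isIn "company" (PySem.Str.lower h) || PySem.Str.isIn "organization" (PySem.Str.lower h)) then "companies"
  else if headers.any (fun h => PySem.Str.isIn "person" (PySem.Str.lower h) || PySem.Str.isIn "employee" (PySem.Str.lower h)) then "people"
  else if headers.any (fun h => PySem.Str.isIn "product" (PySem.Str.lower h) || PySem.Str.isIn "item" (PySem.Str.lower h)) then "items"
  else if headers.any (fun h => PySem.Str.isIn "transaction" (PySem.Str.lower h) || PySem.Str.isIn "payment" (PySem.Str.lower h)) then "transactions"
  else "records"

-- ===== PORT B =====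
def pvNames : List String := ["cities", "companies", "people", "items", "transactions"]

def pvKeywordRank : List (String × Nat) :=
  [("city", 0), ("company", 1), ("organization", 1), ("person", 2), ("employee", 2),
   ("product", 3), ("item", 3), ("transaction", 4), ("payment", 4)]

-- inner loop of Source B: scan the keyword→rank map, lowering `best` when a better rank matches
def pvInner (hl : String) (best : Nat) : Nat :=
  pvKeywordRank.foldl (fun best p => if p.2 < best && PySem.Str.isIn p.1 hl then p.2 else best) best

def generate_array_name_py_alt (headers : List String) : String :=
  let best := headers.foldl (fun best h => pvInner (PySem.Str.lower h) best) 5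
  if best < 5 then pvNames.getD best "records" else "records"

-- ===== PRECONDITION & SPEC =====
def Spec_generate_array_name_py (headers : List String) (out : String) : Prop := out = generate_array_name_py_alt headers
instance (headers : List String) (out : String) : Decidable (Spec_generate_array_name_py headers out) := by unfold Spec_generate_array_name_py; infer_instance

-- ===== CLAIM (what is proved, stated in full; the proofs are below) =====
def Claim_equal_generate_array_name_py : Prop := ∀ (headers : List String), Dom_generate_array_name_py headers → Spec_generate_array_name_py headers (generate_array_name_py headers)

-- ===== LEMMAS AND PROOFS =====

-- rank of a single (already lowered) header: its first matching category, 5 if none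
def pvMr (hl : String) : Nat :=
  if PySem.Str.isIn "city" hl then 0
  else if PySem.Str.isIn "company" hl || PySem.Str.isIn "organization" hl then 1
  else if PySem.Str.isIn "person" hl || PySem.Str.isIn "employee" hl then 2
  else if PySem.Str.isIn "product" hl || PySem.Str.isIn "item" hl then 3
  else if PySem.Str.isIn "transaction" hl || PySem.Str.isIn "payment" hl then 4
  else 5

-- rank of a header list, written with exactly A's conditions
def pvARank (headers : List String) : Nat :=
  if headers.any (fun h => PySem.Str.isIn "city" (PySem.Str.lower h)) then 0
  else if headers.any (fun h => PySem.Str.isIn "company" (PySem.Str.lower h) || PySem.Str.isIn "organization" (PySem.Str.lower h)) then 1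
  else if headers.any (fun h => PySem.Str.isIn "person" (PySem.Str.lower h) || PySem.Str.isIn "employee" (PySem.Str.lower h)) then 2
  else if headers.any (fun h => PySem.Str.isIn "product" (PySem.Str.lower h) || PySem.Str.isIn "item" (PySem.Str.lower h)) then 3
  else if headers.any (fun h => PySem.Str.isIn "transaction" (PySem.Str.lower h) || PySem.Str.isIn "payment" (PySem.Str.lower h)) then 4
  else 5

-- the inner keyword loop, with the nine membership tests abstracted to Bools
def pvBoolFold (c0 c1 c2 c3 c4 c5 c6 c7 c8 : Bool) : Nat :=
  ([(c0, 0), (c1, 1), (c2, 1), (c3, 2), (c4, 2), (c5, 3), (c6, 3), (c7, 4), (c8, 4)] : List (Bool × Nat)).foldl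
    (fun best p => if p.2 < best && p.1 then p.2 else best) 5

theorem pvBoolFold_eq (c0 c1 c2 c3 c4 c5 c6 c7 c8 : Bool) :
    pvBoolFold c0 c1 c2 c3 c4 c5 c6 c7 c8 =
      (if c0 then 0
       else if c1 || c2 then 1
       else if c3 || c4 then 2
       else if c5 || c6 then 3
       else if c7 || c8 then 4
       else 5) := by
  revert c0 c1 c2 c3 c4 c5 c6 c7 c8; decide

-- started from 5, the inner loop computes the first-matching-category rank
theorem pvInner_five (hl : String) : pvInner hl 5 = pvMr hl := by
  have h : pvInner hl 5 = pvBoolFold (PySem.Str.isIn "city" hl) (PySem.Str.isIn "company" hl)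
      (PySem.Str.isIn "organization" hl) (PySem.Str.isIn "person" hl) (PySem.Str.isIn "employee" hl)
      (PySem.Str.isIn "product" hl) (PySem.Str.isIn "item" hl) (PySem.Str.isIn "transaction" hl)
      (PySem.Str.isIn "payment" hl) := rfl
  rw [h, pvBoolFold_eq, pvMr]

-- the inner loop distributes over min in its accumulator
theorem pvFoldKw_min (l : List (String × Nat)) (hl : String) : ∀ (b1 b2 : Nat),
    l.foldl (fun best p => if p.2 < best && PySem.Str.isIn p.1 hl then p.2 else best) (min b1 b2)
      = min b1 (l.foldl (fun best p => if p.2 < best && PySem.Str.isIn p.1 hl then p.2 else best) b2) := by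
  induction l with
  | nil => intro b1 b2; rfl
  | cons p l ih =>
    intro b1 b2
    rw [List.foldl_cons, List.foldl_cons,
        show (if p.2 < min b1 b2 && PySem.Str.isIn p.1 hl then p.2 else min b1 b2)
          = min b1 (if p.2 < b2 && PySem.Str.isIn p.1 hl then p.2 else b2) from by
            cases PySem.Str.isIn p.1 hl <;> simp <;> split_ifs <;> omega,
        ih]

theorem pvInner_eq_min (hl : String) (b : Nat) (hb : b ≤ 5) : pvInner hl b = min b (pvMr hl) := by
  have h := pvFoldKw_min pvKeywordRank hl b 5
  rw [Nat.min_eq_left hb] at h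
  rw [pvInner, h, ← pvInner, pvInner_five]

theorem pvMr_le (hl : String) : pvMr hl ≤ 5 := by
  unfold pvMr; split_ifs <;> omega

-- five-category priority chains: pointwise-or on the left = min of the two chains
theorem pvChainMin (H0 H1 H2 H3 H4 A0 A1 A2 A3 A4 : Bool) :
    (if (H0 || A0) = true then 0
     else if (H1 || A1) = true then 1
     else if (H2 || A2) = true then 2
     else if (H3 || A3) = true then 3
     else if (H4 || A4) = true then 4
     else 5 : Nat)
    = min (if H0 = true then 0 else if H1 = true then 1 else if H2 = true then 2
           else if H3 = true then 3 else if H4 = true then 4 else 5)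
          (if A0 = true then 0 else if A1 = true then 1 else if A2 = true then 2
           else if A3 = true then 3 else if A4 = true then 4 else 5) := by
  revert H0 H1 H2 H3 H4 A0 A1 A2 A3 A4; decide

theorem pvARank_cons (h : String) (t : List String) :
    pvARank (h :: t) = min (pvMr (PySem.Str.lower h)) (pvARank t) := by
  unfold pvARank pvMr
  simp only [List.any_cons]
  exact pvChainMin _ _ _ _ _ _ _ _ _ _

theorem pvFold_eq (t : List String) : ∀ b : Nat, b ≤ 5 →
    t.foldl (fun best h => pvInner (PySem.Str.lower h) best) b = min b (pvARank t) := by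
  induction t with
  | nil => intro b hb; unfold pvARank; simp; omega
  | cons h t ih =>
    intro b hb
    rw [List.foldl_cons, pvInner_eq_min _ _ hb,
        ih _ (by have := pvMr_le (PySem.Str.lower h); omega), pvARank_cons]
    omega

theorem pvARank_le (headers : List String) : pvARank headers ≤ 5 := by
  unfold pvARank; split_ifs <;> omega

-- ===== VERDICT (by name: the statement is the Claim_ definition above) =====
theorem generate_array_name_py_spec : Claim_equal_generate_array_name_py := by
  intro headers _
  unfold Spec_generate_array_name_py generate_array_name_py_alt
  rw [pvFold_eq headers 5 (by omega)]
  have hle := pvARank_le headers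
  rw [show min 5 (pvARank headers) = pvARank headers from by omega]
  unfold generate_array_name_py pvARank
  split_ifs <;> rfl
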